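-- pv_equiv track=rewrite | github.com/alfred5063/AICoreEngine | AIEngine/selenium_interface/ui.py | settings_replace
-- ===== SOURCE A (Python) =====
-- def settings_replace(entries, text):
--     '''
--     Method to handle modifying strings from the settings file that were different from current user session input
--
--     :param list entries:                                       The entries in the settings file to be changed
--     :param list text:                                           The complete contents of the original settings file
--     :rtype:                                                         list
--     '''
--     out = ""
--     for line in text:
--         n = 0
--         for field, value in entries.items():
--             if line.find(field + " = '") == -1:
--                 continue
--             else:
--                 out += field + " = '" + value + "'\n"
--                 n = 1
--                 break
--         if n == 0:
--             out += line
--     return out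
-- ===== SOURCE B (Python) =====
-- def settings_replace(entries, text):
--     # Multi-pattern search: every pattern is field + " = '", so scan each line
--     # once for the " = '" marker and hash-look-up the slice of one of the known
--     # field lengths ending there; the first entry in dict order wins.
--     rank = {}
--     repl = []
--     for i, (field, value) in enumerate(entries.items()):
--         rank[field] = i
--         repl.append(field + " = '" + value + "'\n")
--     lengths = {len(field) for field in rank}
--     parts = []
--     for line in text:
--         best = None
--         for p in range(len(line) - 3):
--             if line[p:p + 4] != " = '":
--                 continue
--             for L in lengths:
--                 if L <= p:
--                     r = rank.get(line[p - L:p])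
--                     if r is not None and (best is None or r < best):
--                         best = r
--         parts.append(line if best is None else repl[best])
--     return "".join(parts)
-- ===== Notes on version B (the rewrite author's own statement) =====
-- stated objective: faster
-- what changed: Instead of running a substring search for every entry on every line, B indexes the entries by field once (field->rank, plus the set of field lengths) and scans each line a single time for the shared " = '" marker, hash-checking only the slices of known field lengths ending at each marker; the lowest rank found wins, as entry order does.
import Mathlib
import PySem

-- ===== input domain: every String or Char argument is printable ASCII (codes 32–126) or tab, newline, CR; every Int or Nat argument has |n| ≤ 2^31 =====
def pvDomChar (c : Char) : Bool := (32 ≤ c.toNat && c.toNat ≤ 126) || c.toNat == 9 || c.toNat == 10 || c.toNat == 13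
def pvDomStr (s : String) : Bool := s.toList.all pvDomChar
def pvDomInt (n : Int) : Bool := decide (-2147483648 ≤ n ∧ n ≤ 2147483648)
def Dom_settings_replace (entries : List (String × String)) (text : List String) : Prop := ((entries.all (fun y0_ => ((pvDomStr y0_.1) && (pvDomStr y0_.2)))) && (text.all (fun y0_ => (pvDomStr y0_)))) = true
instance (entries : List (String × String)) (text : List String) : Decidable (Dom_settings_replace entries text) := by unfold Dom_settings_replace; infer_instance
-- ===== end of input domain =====

-- B replaces A's per-line scan over ALL entries by a single scan of each line for
-- the common " = '" marker plus a hash lookup of the slice of each known field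
-- length ending there (objective: faster when entries are many).

-- the literal pattern " = '" both programs build around
def pvMarker : List Char := " = '".toList

-- ===== PORT A =====
-- replacement piece "field + \" = '\" + value + \"'\n\"" (as code points)
def pvRenderA (f v : String) : List Char := f.toList ++ pvMarker ++ v.toList ++ ['\'', '\n']

-- A's inner "for field, value in entries.items(): … break" (break/flag as Option)
def pvScanA (line : List Char) : List (String × String) → Option (List Char)
  | [] => none
  | (f, v) :: rest =>
      if PySem.Chars.find line (f.toList ++ pvMarker) = -1 then pvScanA line rest
      else some (pvRenderA f v)

def settings_replace (entries : List (String × String)) (text : List String) : String :=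
  String.ofList (text.foldl (fun out line =>
      match pvScanA line.toList (PySem.Dict.ofList entries).items with
      | some s => out ++ s
      | none   => out ++ line.toList) [])

-- ===== PORT B =====
-- B's first loop: "for i, (field, value) in enumerate(entries.items()): rank[field] = i; repl.append(…)"
def pvBuildB (items : List (String × String)) : PySem.Dict String Int × List (List Char) :=
  (PySem.List.enumerate items).foldl
    (fun st iv => (st.1.insert iv.2.1 iv.1,
                   st.2 ++ [iv.2.1.toList ++ pvMarker ++ iv.2.2.toList ++ ['\'', '\n']]))
    (PySem.Dict.empty, [])

-- "lengths = {len(field) for field in rank}"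
def pvLens (rank : PySem.Dict String Int) : List Int :=
  PySem.Set.ofList (rank.keys.map (fun f => (f.toList.length : Int)))

-- "if r is not None and (best is None or r < best): best = r"
def pvStep (best : Option Int) (r : Int) : Option Int :=
  match best with
  | none => some r
  | some b => if r < b then some r else best

-- B's per-line scan: "for p in range(len(line)-3): … for L in lengths: if L <= p: …"
def pvBestB (rank : PySem.Dict String Int) (lens : List Int) (line : List Char) : Option Int :=
  (List.range (line.length - 3)).foldl (fun best (p : Nat) =>
    if PySem.List.slice line (some (p : Int)) (some ((p : Int) + 4)) ≠ pvMarker then best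
    else lens.foldl (fun best L =>
      if L ≤ (p : Int) then
        match rank.get? (String.ofList (PySem.List.slice line (some ((p : Int) - L)) (some (p : Int)))) with
        | none => best
        | some r => pvStep best r
      else best) best) none

-- "parts.append(line if best is None else repl[best])"
def pvLineB (rank : PySem.Dict String Int) (lens : List Int) (repl : List (List Char)) (line : String) : List Char :=
  match pvBestB rank lens line.toList with
  | none => line.toList
  | some b => (PySem.List.pyGet? repl b).getD []

def settings_replace_alt (entries : List (String × String)) (text : List String) : String :=
  let st := pvBuildB (PySem.Dict.ofList entries).items
  String.ofList ((text.map (pvLineB st.1 (pvLens st.1) st.2)).flatten)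

-- ===== PRECONDITION & SPEC =====
def Spec_settings_replace (entries : List (String × String)) (text : List String) (out : String) : Prop := out = settings_replace_alt entries text
instance (entries : List (String × String)) (text : List String) (out : String) : Decidable (Spec_settings_replace entries text out) := by unfold Spec_settings_replace; infer_instance

-- ===== CLAIM (what is proved, stated in full; the proofs are below) =====
def Claim_equal_settings_replace : Prop := ∀ (entries : List (String × String)) (text : List String), Dom_settings_replace entries text → Spec_settings_replace entries text (settings_replace entries text)

-- ===== LEMMAS AND PROOFS =====

-- A's matched-entry predicate: the pattern occurs in the line
def pvQ (l : List Char) (fv : String × String) : Bool :=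
  PySem.Chars.isIn (fv.1.toList ++ pvMarker) l

-- B's candidate ranks for one line, flattened
def pvCands (rank : PySem.Dict String Int) (lens : List Int) (l : List Char) : List Int :=
  (List.range (l.length - 3)).flatMap (fun (p : Nat) =>
    if PySem.List.slice l (some (p : Int)) (some ((p : Int) + 4)) ≠ pvMarker then []
    else lens.filterMap (fun L =>
      if L ≤ (p : Int) then
        rank.get? (String.ofList (PySem.List.slice l (some ((p : Int) - L)) (some (p : Int))))
      else none))

lemma pvScanA_eq_find? (l : List Char) (items : List (String × String)) :
    pvScanA l items = (items.find? (pvQ l)).map (fun fv => pvRenderA fv.1 fv.2) := by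
  induction items with
  | nil => rfl
  | cons fv rest ih =>
    obtain ⟨f, v⟩ := fv
    rw [pvScanA, List.find?_cons]
    by_cases h : (f.toList ++ pvMarker) <:+: l
    · have h1 : ¬ PySem.Chars.find l (f.toList ++ pvMarker) = -1 := by
        rw [PySem.Chars.find_eq_neg_one_iff]; exact not_not_intro h
      have h2 : pvQ l (f, v) = true := by
        simpa [pvQ] using (PySem.Chars.isIn_iff_infix _ _).2 h
      simp [h1, h2]
    · have h1 : PySem.Chars.find l (f.toList ++ pvMarker) = -1 :=
        (PySem.Chars.find_eq_neg_one_iff _ _).2 h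
      have h2 : pvQ l (f, v) = false := by
        unfold pvQ; exact (PySem.Chars.isIn_eq_false_iff _ _).2 h
      simp [h1, h2, ih]

lemma pvEnum_cons (x : String × String) (t : List (String × String)) (s : Int) :
    PySem.List.enumerate (x :: t) s = (s, x) :: PySem.List.enumerate t (s + 1) := rfl

lemma pvEnumMapSnd (xs : List (String × String)) (s : Int) :
    (PySem.List.enumerate xs s).map (·.2) = xs := by
  induction xs generalizing s with
  | nil => rfl
  | cons x t ih => rw [pvEnum_cons, List.map_cons, ih]

lemma pvMemEnum (xs : List (String × String)) (s r : Int) (x : String × String) :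
    (r, x) ∈ PySem.List.enumerate xs s ↔
      ∃ j : Nat, j < xs.length ∧ r = s + j ∧ xs.getD j ("", "") = x := by
  induction xs generalizing s with
  | nil => simp [PySem.List.enumerate]
  | cons y t ih =>
    rw [pvEnum_cons, List.mem_cons, ih]
    constructor
    · rintro (h | ⟨j, hj, hr, hx⟩)
      · obtain ⟨h1, h2⟩ := Prod.mk.inj h
        exact ⟨0, by simp, by simpa using h1, by simpa using h2.symm⟩
      · exact ⟨j + 1, by simpa using hj, by push_cast at hr ⊢; omega, by simpa using hx⟩
    · rintro ⟨j, hj, hr, hx⟩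
      cases j with
      | zero => left; simp at hx hr; simp [hr, hx]
      | succ j => right; exact ⟨j, by simpa using hj, by push_cast at hr ⊢; omega, by simpa using hx⟩

lemma pvFoldPair (l : List (Int × (String × String))) (d : PySem.Dict String Int)
    (acc : List (List Char)) :
    l.foldl (fun st iv => (st.1.insert iv.2.1 iv.1,
        st.2 ++ [iv.2.1.toList ++ pvMarker ++ iv.2.2.toList ++ ['\'', '\n']])) (d, acc)
    = (l.foldl (fun d iv => d.insert iv.2.1 iv.1) d,
       acc ++ l.map (fun iv => pvRenderA iv.2.1 iv.2.2)) := by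
  induction l generalizing d acc with
  | nil => simp
  | cons iv t ih =>
    simp only [List.foldl_cons, List.map_cons]
    rw [ih]
    simp [pvRenderA]

lemma pvBuildB_eq (items : List (String × String)) :
    pvBuildB items =
      ((PySem.List.enumerate items).foldl (fun d iv => d.insert iv.2.1 iv.1) PySem.Dict.empty,
       items.map (fun fv => pvRenderA fv.1 fv.2)) := by
  rw [pvBuildB, pvFoldPair]
  have h : (PySem.List.enumerate items 0).map (fun iv => pvRenderA iv.2.1 iv.2.2)
      = items.map (fun fv => pvRenderA fv.1 fv.2) := by
    rw [show (fun (iv : Int × (String × String)) => pvRenderA iv.2.1 iv.2.2)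
        = (fun fv : String × String => pvRenderA fv.1 fv.2) ∘ (·.2) from rfl,
      ← List.map_map, pvEnumMapSnd]
  rw [h]; simp

lemma pvRankItems (items : List (String × String)) (hnd : (items.map (·.1)).Nodup) :
    (pvBuildB items).1.items
      = (PySem.List.enumerate items).map (fun iv => (iv.2.1, iv.1)) := by
  rw [pvBuildB_eq]
  have hmap : (PySem.List.enumerate items).map (fun iv => iv.2.1) = items.map (·.1) := by
    rw [show (fun (iv : Int × (String × String)) => iv.2.1)
        = (fun fv : String × String => fv.1) ∘ (·.2) from rfl, ← List.map_map, pvEnumMapSnd]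
  have h := PySem.Dict.items_foldl_insert_fresh (PySem.List.enumerate items)
    (fun iv => iv.2.1) (fun iv => iv.1) PySem.Dict.empty
    (by intro a _; exact PySem.Dict.contains_empty _)
    (by rw [hmap]; exact hnd)
  simpa using h

lemma pvRankKeys (items : List (String × String)) (hnd : (items.map (·.1)).Nodup) :
    (pvBuildB items).1.keys = items.map (·.1) := by
  have h := pvRankItems items hnd
  have hk : (pvBuildB items).1.keys = (pvBuildB items).1.items.map (·.1) := rfl
  rw [hk, h, List.map_map]
  rw [show ((·.1) ∘ (fun (iv : Int × (String × String)) => (iv.2.1, iv.1)))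
      = (fun fv : String × String => fv.1) ∘ (·.2) from rfl, ← List.map_map, pvEnumMapSnd]

lemma pvRankKeysNodup (items : List (String × String)) (hnd : (items.map (·.1)).Nodup) :
    (pvBuildB items).1.keys.Nodup := by
  rw [pvRankKeys items hnd]; exact hnd

lemma pvRank_get? (items : List (String × String))
    (hnd : (items.map (·.1)).Nodup) (s : String) (r : Int) :
    (pvBuildB items).1.get? s = some r ↔
      ∃ i : Nat, i < items.length ∧ r = (i : Int) ∧ (items.getD i ("", "")).1 = s := by
  rw [PySem.Dict.get?_eq_some_iff_mem_items _ _ _ (pvRankKeysNodup items hnd),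
    pvRankItems items hnd, List.mem_map]
  constructor
  · rintro ⟨iv, hmem, heq⟩
    obtain ⟨h1, h2⟩ := Prod.mk.inj heq
    obtain ⟨x⟩ := iv
    obtain ⟨j, hj, hr, hx⟩ := (pvMemEnum items 0 _ _).1 hmem
    exact ⟨j, hj, by simp at hr; simp [← h2, hr], by rw [hx]; simpa using h1⟩
  · rintro ⟨i, hi, rfl, hs⟩
    refine ⟨((i : Int), items.getD i ("", "")), ?_,
      by simp [List.getD_eq_getElem?_getD] at hs; simp [hs]⟩
    exact (pvMemEnum items 0 _ _).2 ⟨i, hi, by simp, rfl⟩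

-- the combinatorial core: pattern-in-line ⟺ a marker position plus a suffix of the prefix
lemma pvPat_infix_iff (f l : List Char) :
    (f ++ pvMarker) <:+: l ↔
      ∃ p : Nat, p + 4 ≤ l.length ∧ (l.drop p).take 4 = pvMarker ∧
        ∃ k, k ≤ p ∧ (l.take p).drop k = f := by
  have hm : pvMarker.length = 4 := by decide
  constructor
  · rintro ⟨s, t, h⟩
    refine ⟨s.length + f.length, ?_, ?_, s.length, by omega, ?_⟩
    · have hlen := congrArg List.length h
      simp [hm] at hlen
      omega
    · have hd : l.drop (s.length + f.length) = pvMarker ++ t := by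
        rw [← h]
        simp [List.drop_append]
      rw [hd, List.take_left' hm]
    · have ht : l.take (s.length + f.length) = s ++ f := by
        rw [← h]
        simp [List.take_append, List.take_of_length_le]
      rw [ht, List.drop_left]
  · rintro ⟨p, hp, hmk, k, hk, hf⟩
    refine ⟨(l.take p).take k, (l.drop p).drop 4, ?_⟩
    calc (l.take p).take k ++ (f ++ pvMarker) ++ (l.drop p).drop 4
        = ((l.take p).take k ++ f) ++ (pvMarker ++ (l.drop p).drop 4) := by simp
      _ = l.take p ++ l.drop p := by
          rw [← hf, ← hmk, List.take_append_drop, List.take_append_drop]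
      _ = l := List.take_append_drop _ _

-- B's guarded inner loop as a fold of pvStep over the filtered candidates
lemma pvFoldGuard (g : Int → Option Int) (P : Int → Prop) [DecidablePred P]
    (l : List Int) (b : Option Int) :
    l.foldl (fun best x => if P x then
        (match g x with | none => best | some r => pvStep best r) else best) b
    = (l.filterMap (fun x => if P x then g x else none)).foldl pvStep b := by
  induction l generalizing b with
  | nil => rfl
  | cons x t ih =>
    rw [List.foldl_cons, List.filterMap_cons]
    by_cases hP : P x
    · rw [if_pos hP, if_pos hP]
      cases hg : g x with
      | none => simp only [ih]
      | some r => simp only [List.foldl_cons, ih]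
    · rw [if_neg hP, if_neg hP]
      exact ih b

lemma pvFoldMinSome (cs : List Int) (b : Int) :
    cs.foldl pvStep (some b) = some (cs.foldl min b) := by
  induction cs generalizing b with
  | nil => rfl
  | cons c t ih =>
    rw [List.foldl_cons, List.foldl_cons, ← ih]
    congr 1
    rw [pvStep]
    split_ifs with h <;> simp [min_def] <;> omega

lemma pvFoldMinNone (cs : List Int) : cs.foldl pvStep none = cs.min? := by
  cases cs with
  | nil => rfl
  | cons c t => rw [List.foldl_cons, show pvStep none c = some c from rfl, pvFoldMinSome,
      List.min?_cons']

lemma pvBestB_eq_min? (rank : PySem.Dict String Int) (lens : List Int) (l : List Char) :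
    pvBestB rank lens l = (pvCands rank lens l).min? := by
  rw [← pvFoldMinNone, pvCands, List.foldl_flatMap, pvBestB]
  congr 1
  funext best p
  split_ifs with h
  · rfl
  · exact pvFoldGuard _ (fun L => L ≤ (p : Int)) lens best

lemma pvMem_cands (items : List (String × String))
    (hnd : (items.map (·.1)).Nodup) (l : List Char) (r : Int) :
    r ∈ pvCands (pvBuildB items).1 (pvLens (pvBuildB items).1) l ↔
      ∃ i : Nat, i < items.length ∧ r = (i : Int) ∧ pvQ l (items.getD i ("", "")) = true := by
  have hsl1 : ∀ p : Nat, PySem.List.slice l (some (p : Int)) (some ((p : Int) + 4))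
      = (l.drop p).take 4 := by
    intro p
    have h := PySem.List.slice_natCast l p (p + 4)
    push_cast at h
    rw [h]
    congr 1
    omega
  have hlens : ∀ L : Int, L ∈ pvLens (pvBuildB items).1 ↔
      ∃ f, f ∈ items.map (·.1) ∧ L = (f.toList.length : Int) := by
    intro L
    rw [pvLens, PySem.Set.mem_ofList, List.mem_map, pvRankKeys items hnd]
    constructor
    · rintro ⟨f, hf, rfl⟩; exact ⟨f, hf, rfl⟩
    · rintro ⟨f, hf, rfl⟩; exact ⟨f, hf, rfl⟩
  have hmem : r ∈ pvCands (pvBuildB items).1 (pvLens (pvBuildB items).1) l ↔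
      ∃ p : Nat, p + 4 ≤ l.length ∧ (l.drop p).take 4 = pvMarker ∧
        ∃ L, L ∈ pvLens (pvBuildB items).1 ∧ L ≤ (p : Int) ∧
          (pvBuildB items).1.get? (String.ofList
            (PySem.List.slice l (some ((p : Int) - L)) (some (p : Int)))) = some r := by
    rw [pvCands]
    simp only [List.mem_flatMap, List.mem_range]
    constructor
    · rintro ⟨p, hp, hr⟩
      by_cases hc : PySem.List.slice l (some (p : Int)) (some ((p : Int) + 4)) ≠ pvMarker
      · rw [if_pos hc] at hr; simp at hr
      · rw [if_neg hc] at hr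
        rw [not_not, hsl1] at hc
        rw [List.mem_filterMap] at hr
        obtain ⟨L, hL, hg⟩ := hr
        by_cases hLe : L ≤ (p : Int)
        · rw [if_pos hLe] at hg
          exact ⟨p, by omega, hc, L, hL, hLe, hg⟩
        · rw [if_neg hLe] at hg; cases hg
    · rintro ⟨p, hp, hc, L, hL, hLe, hg⟩
      refine ⟨p, by omega, ?_⟩
      rw [if_neg (by rw [hsl1]; exact not_not_intro hc)]
      exact List.mem_filterMap.2 ⟨L, hL, by rw [if_pos hLe]; exact hg⟩
  rw [hmem]
  constructor
  · rintro ⟨p, hp, hc, L, hL, hLe, hg⟩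
    obtain ⟨f, -, rfl⟩ := (hlens L).1 hL
    have hLn : f.toList.length ≤ p := by exact_mod_cast hLe
    have hsl : PySem.List.slice l (some ((p : Int) - (f.toList.length : Int))) (some (p : Int))
        = (l.take p).drop (p - f.toList.length) := by
      have h1 : ((p : Int) - (f.toList.length : Int)) = ((p - f.toList.length : Nat) : Int) := by
        omega
      rw [h1, PySem.List.slice_natCast, List.drop_take]
    rw [hsl] at hg
    obtain ⟨i, hi, hri, hs⟩ := (pvRank_get? items hnd _ r).1 hg
    refine ⟨i, hi, hri, ?_⟩
    rw [pvQ]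
    refine (PySem.Chars.isIn_iff_infix _ _).2 ((pvPat_infix_iff _ l).2
      ⟨p, hp, hc, p - f.toList.length, by omega, ?_⟩)
    have := congrArg String.toList hs
    rw [String.toList_ofList] at this
    exact this.symm
  · rintro ⟨i, hi, hri, hq⟩
    rw [pvQ] at hq
    obtain ⟨p, hp, hc, k, hk, hf⟩ :=
      (pvPat_infix_iff _ l).1 ((PySem.Chars.isIn_iff_infix _ _).1 hq)
    have hlenf : (items.getD i ("", "")).1.toList.length = p - k := by
      have h := congrArg List.length hf
      rw [List.length_drop, List.length_take, Nat.min_eq_left (by omega : p ≤ l.length)] at h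
      omega
    have hfmem : (items.getD i ("", "")).1 ∈ items.map (·.1) := by
      refine List.mem_map.2 ⟨items.getD i ("", ""), ?_, rfl⟩
      rw [List.getD_eq_getElem _ _ hi]
      exact List.getElem_mem hi
    refine ⟨p, hp, hc, ((items.getD i ("", "")).1.toList.length : Int),
      (hlens _).2 ⟨_, hfmem, rfl⟩, by omega, ?_⟩
    have hsl : PySem.List.slice l
        (some ((p : Int) - ((items.getD i ("", "")).1.toList.length : Int))) (some (p : Int))
        = (l.take p).drop k := by
      have h1 : ((p : Int) - ((items.getD i ("", "")).1.toList.length : Int)) = ((k : Nat) : Int) := by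
        omega
      rw [h1, PySem.List.slice_natCast, List.drop_take]
    rw [hsl]
    exact (pvRank_get? items hnd _ r).2 ⟨i, hi, hri, by
      apply String.toList_inj.1; rw [String.toList_ofList]; exact hf.symm⟩

-- per line the two programs produce the same piece
lemma pvLine_eq (items : List (String × String))
    (hnd : (items.map (·.1)).Nodup) (line : String) :
    (match pvScanA line.toList items with
     | some s => s
     | none   => line.toList) =
    pvLineB (pvBuildB items).1 (pvLens (pvBuildB items).1) (pvBuildB items).2 line := by
  rw [pvLineB, pvScanA_eq_find?, pvBestB_eq_min?]
  cases hf : items.findIdx? (pvQ line.toList) with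
  | none =>
    have hfind : items.find? (pvQ line.toList) = none := List.find?_eq_none.2 (fun x hx => by
      simp [List.findIdx?_eq_none_iff.1 hf x hx])
    have hcand : pvCands (pvBuildB items).1 (pvLens (pvBuildB items).1) line.toList = [] := by
      rw [List.eq_nil_iff_forall_not_mem]
      intro r hr
      obtain ⟨i, hi, _, hq⟩ := (pvMem_cands items hnd line.toList r).1 hr
      have hx : items.getD i ("", "") ∈ items := by
        rw [List.getD_eq_getElem _ _ hi]; exact List.getElem_mem hi
      rw [List.findIdx?_eq_none_iff.1 hf _ hx] at hq
      exact Bool.false_ne_true hq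
    rw [hfind, hcand]
    rfl
  | some i =>
    obtain ⟨hi, hqi, hlt⟩ := List.findIdx?_eq_some_iff_getElem.1 hf
    have hfind : items.find? (pvQ line.toList) = some items[i] :=
      List.find?_eq_some_iff_getElem.2 ⟨hqi, i, hi, rfl, fun j hj => by simp [hlt j hj]⟩
    have hmin : (pvCands (pvBuildB items).1 (pvLens (pvBuildB items).1) line.toList).min?
        = some (i : Int) := by
      apply List.min?_eq_some_iff.2
      constructor
      · exact (pvMem_cands items hnd line.toList _).2 ⟨i, hi, rfl, by
          rw [List.getD_eq_getElem _ _ hi]; exact hqi⟩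
      · intro b hb
        obtain ⟨j, hj, rfl, hqj⟩ := (pvMem_cands items hnd line.toList b).1 hb
        have hnotlt : ¬ j < i := fun hlt' => (by
          have := hlt j hlt'
          rw [List.getD_eq_getElem _ _ hj] at hqj
          exact this hqj)
        exact_mod_cast Nat.le_of_not_lt hnotlt
    rw [hfind, hmin]
    have hsnd : (pvBuildB items).2 = items.map (fun fv => pvRenderA fv.1 fv.2) :=
      congrArg Prod.snd (pvBuildB_eq items)
    rw [hsnd]
    show pvRenderA items[i].1 items[i].2
        = (PySem.List.pyGet? (items.map (fun fv => pvRenderA fv.1 fv.2)) ((i : Nat) : Int)).getD []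
    rw [PySem.List.pyGet?_natCast]
    simp [hi]

-- ===== VERDICT (by name: the statement is the Claim_ definition above) =====
theorem settings_replace_spec : Claim_equal_settings_replace := by
  unfold Claim_equal_settings_replace
  intro entries text _
  unfold Spec_settings_replace
  simp only [settings_replace, settings_replace_alt]
  have hnd : (((PySem.Dict.ofList entries).items).map (·.1)).Nodup :=
    PySem.Dict.nodup_keys_ofList entries
  congr 1
  have hstep : (fun (out : List Char) (line : String) =>
      match pvScanA line.toList (PySem.Dict.ofList entries).items with
      | some s => out ++ s
      | none   => out ++ line.toList)
      = (fun (out : List Char) (line : String) => out ++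
          match pvScanA line.toList (PySem.Dict.ofList entries).items with
          | some s => s
          | none   => line.toList) := by
    funext out line
    cases pvScanA line.toList (PySem.Dict.ofList entries).items <;> rfl
  rw [hstep, PySem.List.foldl_append_eq_flatMap, List.nil_append, List.flatMap_def]
  congr 1
  apply List.map_congr_left
  intro line _
  exact pvLine_eq (PySem.Dict.ofList entries).items hnd line
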